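-- pv_equiv track=rewrite | github.com/posl/comment_recommendation | script/split_gen/2_time/en/272_D/6.py | solve
-- ===== SOURCE A (Python) =====
-- def solve(N, M):
--     if M == 1:
--         return [[0] * N for _ in range(N)]
--     ans = [[-1] * N for _ in range(N)]
--     ans[0][0] = 0
--     for i in range(1, N):
--         ans[0][i] = ans[0][i-1] + 1
--         ans[i][0] = ans[i-1][0] + 1
--     for i in range(1, N):
--         for j in range(1, N):
--             x = i + j
--             y = i - j
--             if M == x * x:
--                 ans[i][j] = ans[i-1][j] + 1
--             if M == y * y:
--                 ans[i][j] = ans[i][j-1] + 1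
--             if ans[i][j-1] != -1 and ans[i-1][j] != -1:
--                 ans[i][j] = min(ans[i][j-1] + 1, ans[i-1][j] + 1)
--     return ans
-- ===== SOURCE B (Python) =====
-- def solve(N, M):
--     # The DP's min-branch fires for every interior cell, so entry (i, j) is always i + j.
--     if M == 1:
--         return [[0] * N for _ in range(N)]
--     return [[i + j for j in range(N)] for i in range(N)]
-- ===== Notes on version B (the rewrite author's own statement) =====
-- stated objective: simpler
-- what changed: Replaced the neighbor-DP with seeding loops and dead M==x*x/M==y*y branches by the closed form ans[i][j] = i+j, since the min-of-neighbors branch always fires and overwrites the earlier writes.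
import Mathlib
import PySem

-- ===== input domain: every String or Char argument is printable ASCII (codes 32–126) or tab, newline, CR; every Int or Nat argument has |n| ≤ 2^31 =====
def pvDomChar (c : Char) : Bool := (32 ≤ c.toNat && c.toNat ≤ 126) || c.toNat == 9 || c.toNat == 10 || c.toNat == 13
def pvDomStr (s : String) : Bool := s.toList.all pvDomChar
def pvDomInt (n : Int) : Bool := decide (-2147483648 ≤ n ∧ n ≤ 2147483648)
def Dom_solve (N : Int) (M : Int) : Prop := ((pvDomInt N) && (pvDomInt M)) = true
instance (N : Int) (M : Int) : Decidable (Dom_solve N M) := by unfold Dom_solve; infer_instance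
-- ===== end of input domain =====

-- B replaces A's neighbor-DP (whose min-branch always fires) by the closed form ans[i][j] = i+j; objective: simpler.

-- ===== PORT A =====
-- ans[i][j] read: indices reachable inside Pre_ are always in range, so the default -1 is never used there
def pyGet2 (m : List (List Int)) (i j : Int) : Int :=
  ((m[i.toNat]?.getD []))[j.toNat]?.getD (-1)

-- ans[i][j] = v write: indices reachable inside Pre_ are always nonnegative and in range
def pySet2 (m : List (List Int)) (i j : Int) (v : Int) : List (List Int) :=
  match m[i.toNat]? with
  | some row => m.set i.toNat (row.set j.toNat v)
  | none => m

def solve (N : Int) (M : Int) : List (List Int) :=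
  if M = 1 then List.replicate N.toNat (List.replicate N.toNat 0)
  else
    let ans := List.replicate N.toNat (List.replicate N.toNat (-1))
    let ans := pySet2 ans 0 0 0
    let ans := (PySem.List.pyRange 1 N 1).foldl (fun m i =>
        let m := pySet2 m 0 i (pyGet2 m 0 (i-1) + 1)
        pySet2 m i 0 (pyGet2 m (i-1) 0 + 1)) ans
    (PySem.List.pyRange 1 N 1).foldl (fun m i =>
        (PySem.List.pyRange 1 N 1).foldl (fun m j =>
          let x := i + j
          let y := i - j
          let m := if M = x * x then pySet2 m i j (pyGet2 m (i-1) j + 1) else m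
          let m := if M = y * y then pySet2 m i j (pyGet2 m i (j-1) + 1) else m
          if pyGet2 m i (j-1) ≠ -1 ∧ pyGet2 m (i-1) j ≠ -1 then
            pySet2 m i j (min (pyGet2 m i (j-1) + 1) (pyGet2 m (i-1) j + 1))
          else m) m) ans

-- ===== PORT B =====
def solve_alt (N : Int) (M : Int) : List (List Int) :=
  if M = 1 then List.replicate N.toNat (List.replicate N.toNat 0)
  else (List.range N.toNat).map (fun (i : Nat) => (List.range N.toNat).map (fun (j : Nat) => (i : Int) + (j : Int)))

-- ===== PRECONDITION & SPEC =====
-- For M ≠ 1 and N ≤ 0 the Python A raises IndexError at ans[0][0]; those inputs are excluded.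
def Pre_solve (N : Int) (M : Int) : Prop := M = 1 ∨ 1 ≤ N
instance (N : Int) (M : Int) : Decidable (Pre_solve N M) := by unfold Pre_solve; infer_instance
def pvWitness_solve : Int × Int := (3, 2)

def Spec_solve (N : Int) (M : Int) (out : List (List Int)) : Prop := out = solve_alt N M
instance (N : Int) (M : Int) (out : List (List Int)) : Decidable (Spec_solve N M out) := by unfold Spec_solve; infer_instance

-- ===== CLAIM (what is proved, stated in full; the proofs are below) =====
def Claim_equal_solve : Prop := ∀ (N : Int) (M : Int), Dom_solve N M → Pre_solve N M → Spec_solve N M (solve N M)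

-- ===== LEMMAS AND PROOFS =====

-- the state matrix as a function of cell contents
def stateMat (n : Nat) (f : Nat → Nat → Int) : List (List Int) :=
  (List.range n).map (fun i => (List.range n).map (fun j => f i j))

theorem stateMat_congr {n : Nat} {f g : Nat → Nat → Int}
    (h : ∀ a b, a < n → b < n → f a b = g a b) : stateMat n f = stateMat n g := by
  unfold stateMat
  refine List.map_congr_left ?_
  intro a ha
  refine List.map_congr_left ?_
  intro b hb
  exact h a b (List.mem_range.mp ha) (List.mem_range.mp hb)

theorem stateMat_const (n : Nat) (c : Int) :
    List.replicate n (List.replicate n c) = stateMat n (fun _ _ => c) := by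
  unfold stateMat
  simp [List.map_const']

theorem pyGet2_stateMat {n : Nat} (f : Nat → Nat → Int) {i j : Int}
    (_hi0 : 0 ≤ i) (hin : i.toNat < n) (_hj0 : 0 ≤ j) (hjn : j.toNat < n) :
    pyGet2 (stateMat n f) i j = f i.toNat j.toNat := by
  unfold pyGet2 stateMat
  simp [hin, hjn]

theorem pySet2_stateMat {n : Nat} (f : Nat → Nat → Int) {i j : Int} (v : Int)
    (hin : i.toNat < n) (_hjn : j.toNat < n) :
    pySet2 (stateMat n f) i j v
      = stateMat n (fun a b => if a = i.toNat ∧ b = j.toNat then v else f a b) := by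
  unfold pySet2 stateMat
  simp only [List.getElem?_map, List.getElem?_range, hin]
  simp only [Option.map_some]
  refine List.ext_getElem (by simp) ?_
  intro a h1 h2
  simp only [List.getElem_set, List.getElem_map, List.getElem_range]
  by_cases ha : i.toNat = a
  · subst ha
    refine List.ext_getElem (by simp) ?_
    intro b h3 h4
    simp only [List.getElem_set, List.getElem_map, List.getElem_range]
    by_cases hb : j.toNat = b
    · subst hb; simp
    · simp [hb, Ne.symm hb]
  · simp only [if_neg ha]
    refine List.ext_getElem (by simp) ?_
    intro b h3 h4
    simp [Ne.symm ha]


-- proof-side names for A's loop bodies (definitionally equal to the lambdas in `solve`)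
def innerBody (M : Int) (i : Int) (m : List (List Int)) (j : Int) : List (List Int) :=
  let x := i + j
  let y := i - j
  let m := if M = x * x then pySet2 m i j (pyGet2 m (i-1) j + 1) else m
  let m := if M = y * y then pySet2 m i j (pyGet2 m i (j-1) + 1) else m
  if pyGet2 m i (j-1) ≠ -1 ∧ pyGet2 m (i-1) j ≠ -1 then
    pySet2 m i j (min (pyGet2 m i (j-1) + 1) (pyGet2 m (i-1) j + 1))
  else m

def outerBody (M N : Int) (m : List (List Int)) (i : Int) : List (List Int) :=
  (PySem.List.pyRange 1 N 1).foldl (innerBody M i) m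

def seedBody (m : List (List Int)) (i : Int) : List (List Int) :=
  let m := pySet2 m 0 i (pyGet2 m 0 (i-1) + 1)
  pySet2 m i 0 (pyGet2 m (i-1) 0 + 1)

-- invariants
def seedInv (k : Nat) (a b : Nat) : Int :=
  if (a = 0 ∧ b < k) ∨ (b = 0 ∧ a < k) then (a : Int) + b else -1

def innerInv (t s : Nat) (a b : Nat) : Int :=
  if a < t ∨ b = 0 ∨ (a = t ∧ b < s) then (a : Int) + b else -1

theorem cast_sub_one (t : Nat) (ht : 1 ≤ t) : ((t : Int) - 1) = ((t - 1 : Nat) : Int) := by omega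

theorem tail_eval (n t s : Nat) (ht : 1 ≤ t) (htn : t < n) (hs : 1 ≤ s) (hsn : s < n)
    (g : Nat → Nat → Int)
    (hg : ∀ a b, a < n → b < n → ¬(a = t ∧ b = s) → g a b = innerInv t s a b) :
    (if pyGet2 (stateMat n g) (t : Int) ((s : Int)-1) ≠ -1 ∧
        pyGet2 (stateMat n g) ((t : Int)-1) (s : Int) ≠ -1 then
       pySet2 (stateMat n g) (t : Int) (s : Int)
         (min (pyGet2 (stateMat n g) (t : Int) ((s : Int)-1) + 1)
              (pyGet2 (stateMat n g) ((t : Int)-1) (s : Int) + 1))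
     else stateMat n g) = stateMat n (innerInv t (s+1)) := by
  have h1 : pyGet2 (stateMat n g) (t : Int) ((s : Int)-1) = (t : Int) + ((s-1 : Nat) : Int) := by
    rw [cast_sub_one s hs,
        pyGet2_stateMat g (by positivity) (by simp; omega) (by positivity) (by simp; omega)]
    simp only [Int.toNat_natCast]
    rw [hg t (s-1) htn (by omega) (by omega)]
    unfold innerInv
    split_ifs <;> omega
  have h2 : pyGet2 (stateMat n g) ((t : Int)-1) (s : Int) = ((t-1 : Nat) : Int) + s := by
    rw [cast_sub_one t ht,
        pyGet2_stateMat g (by positivity) (by simp; omega) (by positivity) (by simp; omega)]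
    simp only [Int.toNat_natCast]
    rw [hg (t-1) s (by omega) hsn (by omega)]
    unfold innerInv
    split_ifs <;> omega
  have hc : pyGet2 (stateMat n g) (t : Int) ((s : Int)-1) ≠ -1 ∧
      pyGet2 (stateMat n g) ((t : Int)-1) (s : Int) ≠ -1 := by
    rw [h1, h2]; constructor <;> omega
  rw [if_pos hc, h1, h2]
  have hmin : min ((t : Int) + ((s-1 : Nat) : Int) + 1) (((t-1 : Nat) : Int) + (s : Int) + 1)
      = (t : Int) + s := by omega
  rw [hmin, pySet2_stateMat g _ (by simp; omega) (by simp; omega)]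
  simp only [Int.toNat_natCast]
  apply stateMat_congr
  intro a b ha hb
  by_cases hab : a = t ∧ b = s
  · rw [if_pos hab]; unfold innerInv
    split_ifs <;> omega
  · rw [if_neg hab, hg a b ha hb hab]
    unfold innerInv
    split_ifs <;> omega

theorem innerBody_eval (n t s : Nat) (M : Int) (ht : 1 ≤ t) (htn : t < n) (hs : 1 ≤ s) (hsn : s < n) :
    innerBody M (t : Int) (stateMat n (innerInv t s)) (s : Int) = stateMat n (innerInv t (s+1)) := by
  simp only [innerBody]
  have hpres : ∀ (g : Nat → Nat → Int) (v : Int),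
      (∀ a b, a < n → b < n → ¬(a = t ∧ b = s) → g a b = innerInv t s a b) →
      ∃ g', pySet2 (stateMat n g) (t : Int) (s : Int) v = stateMat n g' ∧
        (∀ a b, a < n → b < n → ¬(a = t ∧ b = s) → g' a b = innerInv t s a b) := by
    intro g v hgm
    refine ⟨_, pySet2_stateMat g v (by simp; omega) (by simp; omega), ?_⟩
    intro a b ha hb hab
    simp only [Int.toNat_natCast]
    rw [if_neg hab]
    exact hgm a b ha hb hab
  have base : ∀ a b, a < n → b < n → ¬(a = t ∧ b = s) →
      innerInv t s a b = innerInv t s a b := fun _ _ _ _ _ => rfl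
  by_cases hx : M = ((t : Int) + s) * ((t : Int) + s)
  · rw [if_pos hx]
    obtain ⟨g1, hg1, hg1p⟩ := hpres _ (pyGet2 (stateMat n (innerInv t s)) ((t:Int)-1) (s:Int) + 1) base
    rw [hg1]
    by_cases hy : M = ((t : Int) - s) * ((t : Int) - s)
    · rw [if_pos hy]
      obtain ⟨g2, hg2, hg2p⟩ := hpres _ (pyGet2 (stateMat n g1) (t:Int) ((s:Int)-1) + 1) hg1p
      rw [hg2]
      exact tail_eval n t s ht htn hs hsn g2 hg2p
    · rw [if_neg hy]
      exact tail_eval n t s ht htn hs hsn g1 hg1p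
  · rw [if_neg hx]
    by_cases hy : M = ((t : Int) - s) * ((t : Int) - s)
    · rw [if_pos hy]
      obtain ⟨g2, hg2, hg2p⟩ := hpres _ (pyGet2 (stateMat n (innerInv t s)) (t:Int) ((s:Int)-1) + 1) base
      rw [hg2]
      exact tail_eval n t s ht htn hs hsn g2 hg2p
    · rw [if_neg hy]
      exact tail_eval n t s ht htn hs hsn _ base

theorem inner_loop (n t : Nat) (M N : Int) (hN : N = (n : Int)) (ht : 1 ≤ t) (htn : t < n) :
    ∀ (d s : Nat), 1 ≤ s → s + d = n →
      (PySem.List.pyRange (s : Int) N 1).foldl (innerBody M (t : Int)) (stateMat n (innerInv t s))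
        = stateMat n (innerInv t n) := by
  intro d
  induction d with
  | zero =>
    intro s h1 h2
    have : s = n := by omega
    subst this
    rw [hN, PySem.List.pyRange_one_eq_nil le_rfl, List.foldl_nil]
  | succ d ih =>
    intro s h1 h2
    have hsn : s < n := by omega
    rw [PySem.List.pyRange_one_cons (by omega), List.foldl_cons,
        innerBody_eval n t s M ht htn h1 hsn]
    have hcast : ((s : Int) + 1) = ((s + 1 : Nat) : Int) := by push_cast; ring
    rw [hcast]
    exact ih (s+1) (by omega) (by omega)

theorem outer_loop (n : Nat) (M N : Int) (hN : N = (n : Int)) (hn : 1 ≤ n) :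
    ∀ (d t : Nat), 1 ≤ t → t + d = n →
      (PySem.List.pyRange (t : Int) N 1).foldl (outerBody M N) (stateMat n (innerInv t 0))
        = stateMat n (fun a b => (a : Int) + b) := by
  intro d
  induction d with
  | zero =>
    intro t h1 h2
    have : t = n := by omega
    subst this
    rw [hN, PySem.List.pyRange_one_eq_nil le_rfl, List.foldl_nil]
    apply stateMat_congr
    intro a b ha hb
    unfold innerInv
    split_ifs <;> omega
  | succ d ih =>
    intro t h1 h2
    have htn : t < n := by omega
    rw [PySem.List.pyRange_one_cons (by omega), List.foldl_cons]
    have hstep : outerBody M N (stateMat n (innerInv t 0)) (t : Int)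
        = stateMat n (innerInv (t+1) 0) := by
      unfold outerBody
      have e1 : stateMat n (innerInv t 0) = stateMat n (innerInv t 1) :=
        stateMat_congr (by intro a b ha hb; unfold innerInv; split_ifs <;> omega)
      rw [e1, show (PySem.List.pyRange 1 N 1) = PySem.List.pyRange ((1:Nat):Int) N 1 from by norm_num,
          inner_loop n t M N hN h1 htn (n-1) 1 le_rfl (by omega)]
      exact stateMat_congr (by intro a b ha hb; unfold innerInv; split_ifs <;> omega)
    rw [hstep]
    have hcast : ((t : Int) + 1) = ((t + 1 : Nat) : Int) := by push_cast; ring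
    rw [hcast]
    exact ih (t+1) (by omega) (by omega)

theorem seedBody_eval (n t : Nat) (ht : 1 ≤ t) (htn : t < n) :
    seedBody (stateMat n (seedInv t)) (t : Int) = stateMat n (seedInv (t+1)) := by
  unfold seedBody
  have h1 : pyGet2 (stateMat n (seedInv t)) 0 ((t : Int)-1) = ((t-1 : Nat) : Int) := by
    rw [cast_sub_one t ht,
        pyGet2_stateMat _ le_rfl (by simp; omega) (by positivity) (by simp; omega)]
    simp only [Int.toNat_natCast, Int.toNat_zero]
    unfold seedInv
    split_ifs <;> omega
  rw [h1, pySet2_stateMat _ _ (by simp; omega) (by simp; omega)]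
  simp only [Int.toNat_natCast, Int.toNat_zero]
  rw [cast_sub_one t ht,
      pyGet2_stateMat _ (by positivity) (by simp; omega) le_rfl (by simp; omega)]
  simp only [Int.toNat_natCast, Int.toNat_zero]
  rw [if_neg (show ¬((t - 1 : Nat) = 0 ∧ 0 = t) from by omega),
      show seedInv t (t-1) 0 = ((t-1 : Nat) : Int) from by unfold seedInv; split_ifs <;> omega,
      pySet2_stateMat _ _ (by simp; omega) (by simp; omega)]
  simp only [Int.toNat_natCast, Int.toNat_zero]
  apply stateMat_congr
  intro a b ha hb
  unfold seedInv
  split_ifs <;> omega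

theorem seed_loop (n : Nat) (N : Int) (hN : N = (n : Int)) :
    ∀ (d t : Nat), 1 ≤ t → t + d = n →
      (PySem.List.pyRange (t : Int) N 1).foldl seedBody (stateMat n (seedInv t))
        = stateMat n (seedInv n) := by
  intro d
  induction d with
  | zero =>
    intro t h1 h2
    have : t = n := by omega
    subst this
    rw [hN, PySem.List.pyRange_one_eq_nil le_rfl, List.foldl_nil]
  | succ d ih =>
    intro t h1 h2
    have htn : t < n := by omega
    rw [PySem.List.pyRange_one_cons (by omega), List.foldl_cons, seedBody_eval n t h1 htn]
    have hcast : ((t : Int) + 1) = ((t + 1 : Nat) : Int) := by push_cast; ring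
    rw [hcast]
    exact ih (t+1) (by omega) (by omega)

theorem solve_eq_fold (N M : Int) (hM : M ≠ 1) :
    solve N M = (PySem.List.pyRange 1 N 1).foldl (outerBody M N)
      ((PySem.List.pyRange 1 N 1).foldl seedBody
        (pySet2 (List.replicate N.toNat (List.replicate N.toNat (-1))) 0 0 0)) := by
  rw [solve, if_neg hM]
  rfl

-- ===== VERDICT (by name: the statement is the Claim_ definition above) =====
theorem solve_spec : Claim_equal_solve := by
  intro N M _ hp
  unfold Spec_solve
  by_cases hM : M = 1
  · simp [solve, solve_alt, hM]
  · have hN : 1 ≤ N := by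
      rcases hp with h | h
      · exact absurd h hM
      · exact h
    set n := N.toNat with hn_def
    have hn : 1 ≤ n := by omega
    have hNn : N = (n : Int) := by omega
    have einit : pySet2 (List.replicate n (List.replicate n (-1))) 0 0 0
        = stateMat n (seedInv 1) := by
      rw [stateMat_const, pySet2_stateMat _ _ (by simp; omega) (by simp; omega)]
      apply stateMat_congr
      intro a b ha hb
      simp only [Int.toNat_zero]
      unfold seedInv
      split_ifs <;> omega
    rw [solve_eq_fold N M hM, einit,
        show PySem.List.pyRange 1 N 1 = PySem.List.pyRange ((1:Nat):Int) N 1 from by norm_num,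
        seed_loop n N hNn (n-1) 1 le_rfl (by omega),
        show stateMat n (seedInv n) = stateMat n (innerInv 1 0) from stateMat_congr (by
          intro a b ha hb
          unfold seedInv innerInv
          split_ifs <;> omega),
        outer_loop n M N hNn hn (n-1) 1 le_rfl (by omega)]
    rw [solve_alt, if_neg hM]
    rfl
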